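-- pv_equiv track=rewrite | github.com/grapergrape/cypher-competition | preprocessing.py | check_brackets
-- ===== SOURCE A (Python) =====
-- def check_brackets(s: str) -> bool:
--     """
--     This function checks if the cypher query contains variable length relationships as those are not supposed
--     to be processed by this code which marks them as 'Syntax error' if they do not make sense according to the schema
--
--     Input: cypher query
--     Output: True if variable length relationship is present, False otherwise
--     """
--     inside_brackets = False
--     for char in s:
--         if char == '[':
--             inside_brackets = True
--         elif char == ']':
--             inside_brackets = False
--         elif char == '*' and inside_brackets:
--             return True
--     return False
-- ===== SOURCE B (Python) =====
-- def check_brackets(s: str) -> bool: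
--     """
--     This function checks if the cypher query contains variable length relationships as those are not supposed
--     to be processed by this code which marks them as 'Syntax error' if they do not make sense according to the schema
--
--     Input: cypher query
--     Output: True if variable length relationship is present, False otherwise
--     """
--     return any(
--         seg.find('[') != -1 and '*' in seg[seg.find('['):]
--         for seg in s.split(']')
--     )
-- ===== Notes on version B (the rewrite author's own statement) =====
-- stated objective: idiomatic
-- what changed: A's explicit character loop with an inside_brackets flag is replaced by splitting the query on ']' and testing each piece for a '*' at or after its first '[' using str.split/str.find/substring membership, with no loop state.
import Mathlib
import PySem

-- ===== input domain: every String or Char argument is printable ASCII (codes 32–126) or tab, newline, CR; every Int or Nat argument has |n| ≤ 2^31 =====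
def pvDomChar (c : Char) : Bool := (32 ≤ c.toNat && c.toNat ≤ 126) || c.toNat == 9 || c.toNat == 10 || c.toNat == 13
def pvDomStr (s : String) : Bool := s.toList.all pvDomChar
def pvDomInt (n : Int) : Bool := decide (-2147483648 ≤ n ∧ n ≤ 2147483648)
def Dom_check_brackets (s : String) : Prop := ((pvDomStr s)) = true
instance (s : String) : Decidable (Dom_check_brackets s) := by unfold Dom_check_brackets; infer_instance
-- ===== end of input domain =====

-- B replaces A's one-character state machine by splitting the query on ']' and checking each piece
-- for a '*' at or after its first '[' (objective: idiomatic, no explicit loop state; no speed claim).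

-- ===== PORT A =====
-- A's loop: for char in s, tracking inside_brackets, early return True on a '*' inside brackets.
def checkBracketsLoopA : List Char → Bool → Bool
  | [], _ => false
  | c :: rest, ins =>
    if c = '[' then checkBracketsLoopA rest true
    else if c = ']' then checkBracketsLoopA rest false
    else if c = '*' && ins then true
    else checkBracketsLoopA rest ins

def check_brackets (s : String) : Bool := checkBracketsLoopA s.toList false

-- ===== PORT B =====
-- seg.find('[') != -1 and '*' in seg[seg.find('['):]
def segHasStarAfterBracket (seg : String) : Bool :=
  PySem.Str.find seg "[" != -1 &&
    PySem.Str.isIn "*" (PySem.Str.slice seg (some (PySem.Str.find seg "[")) none)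

def check_brackets_alt (s : String) : Bool :=
  match PySem.Str.split? s "]" with
  | some segs => segs.any segHasStarAfterBracket
  | none => false   -- unreachable: the separator "]" is non-empty

-- ===== PRECONDITION & SPEC =====
def Spec_check_brackets (s : String) (out : Bool) : Prop := out = check_brackets_alt s
instance (s : String) (out : Bool) : Decidable (Spec_check_brackets s out) := by unfold Spec_check_brackets; infer_instance

-- ===== CLAIM (what is proved, stated in full; the proofs are below) =====
def Claim_equal_check_brackets : Prop := ∀ (s : String), Dom_check_brackets s → Spec_check_brackets s (check_brackets s)

-- ===== LEMMAS AND PROOFS =====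

-- B's per-segment test, on the List Char side.
def segStarL (seg : List Char) : Bool :=
  PySem.Chars.find seg ['['] != -1 &&
    PySem.Chars.isIn ['*'] (PySem.Chars.slice seg (some (PySem.Chars.find seg ['['])) none)

theorem segHasStarAfterBracket_toList (seg : String) :
    segHasStarAfterBracket seg = segStarL seg.toList := by
  simp [segHasStarAfterBracket, segStarL, PySem.Str.find_eq, PySem.Str.isIn_eq,
    PySem.Str.toList_slice, PySem.Chars.slice_eq_listSlice]

-- structural model of s.split(c) for a one-character separator: (first piece, later pieces)
def splitChar (c : Char) : List Char → List Char × List (List Char)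
  | [] => ([], [])
  | x :: rest =>
    let p := splitChar c rest
    if x = c then ([], p.1 :: p.2) else (x :: p.1, p.2)

theorem splitOn_go_single (c : Char) : ∀ (fuel : ℕ) (l cur : List Char) (acc : List (List Char)),
    l.length ≤ fuel →
    PySem.Chars.splitOn.go [c] fuel l cur acc =
      acc.reverse ++ (cur.reverse ++ (splitChar c l).1) :: (splitChar c l).2 := by
  intro fuel
  induction fuel with
  | zero =>
    intro l cur acc hl
    have : l = [] := by cases l <;> simp_all
    subst this
    simp [PySem.Chars.splitOn.go, splitChar]
  | succ fuel ih =>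
    intro l cur acc hl
    cases l with
    | nil => simp [PySem.Chars.splitOn.go, splitChar]
    | cons x rest =>
      by_cases hx : x = c
      · subst hx
        rw [show PySem.Chars.splitOn.go [x] (fuel+1) (x :: rest) cur acc
              = PySem.Chars.splitOn.go [x] fuel rest [] (cur.reverse :: acc) by
            simp [PySem.Chars.splitOn.go]]
        rw [ih rest [] (cur.reverse :: acc) (by simpa using Nat.le_of_succ_le_succ (by simpa using hl))]
        simp [splitChar]
      · rw [show PySem.Chars.splitOn.go [c] (fuel+1) (x :: rest) cur acc
              = PySem.Chars.splitOn.go [c] fuel rest (x :: cur) acc by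
            simp [PySem.Chars.splitOn.go, List.isPrefixOf, Ne.symm hx]]
        rw [ih rest (x :: cur) acc (by simpa using Nat.le_of_succ_le_succ (by simpa using hl))]
        simp [splitChar, hx]

theorem splitOn_single (c : Char) (l : List Char) :
    PySem.Chars.splitOn l [c] = (splitChar c l).1 :: (splitChar c l).2 := by
  have := splitOn_go_single c (l.length + 1) l [] [] (by omega)
  simpa [PySem.Chars.splitOn] using this

-- find points at n when n is the first index whose suffix starts with sub
theorem find_eq_of_first {s sub : List Char} {n : ℕ}
    (hpre : sub <+: s.drop n) (hmin : ∀ i < n, ¬ sub <+: s.drop i) :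
    PySem.Chars.find s sub = (n : ℤ) := by
  have hinf : sub <:+: s := by
    rw [← PySem.Chars.isIn_iff_infix, ← PySem.Chars.exists_prefix_drop_iff_isIn]
    exact ⟨n, hpre⟩
  have hnn : 0 ≤ PySem.Chars.find s sub := (PySem.Chars.find_nonneg_iff s sub).2 hinf
  obtain ⟨hp, hm⟩ := PySem.Chars.find_spec hnn
  have : (PySem.Chars.find s sub).toNat = n := by
    rcases Nat.lt_trichotomy (PySem.Chars.find s sub).toNat n with h | h | h
    · exact absurd hp (hmin _ h)
    · exact h
    · exact absurd hpre (hm _ h)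
  omega

theorem segStarL_nil : segStarL [] = false := by decide

theorem segStarL_bracket_cons (h : List Char) :
    segStarL ('[' :: h) = h.contains '*' := by
  have hf : PySem.Chars.find ('[' :: h) ['['] = ((0 : ℕ) : ℤ) :=
    find_eq_of_first (by simp) (by omega)
  have hin : PySem.Chars.isIn ['*'] ('[' :: h) = h.contains '*' := by
    by_cases hs : '*' ∈ h
    · simp [PySem.Chars.isIn_iff_infix, List.singleton_infix_iff, hs]
    · have hni : ¬ ['*'] <:+: ('[' :: h) := by
        rw [List.singleton_infix_iff]; simp [hs]
      simp [(PySem.Chars.isIn_eq_false_iff _ _).2 hni, hs]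
  simp [segStarL, hf, PySem.Chars.slice_eq_listSlice, PySem.List.slice_from, hin]

theorem segStarL_cons_of_ne {x : Char} (hx : x ≠ '[') (h : List Char) :
    segStarL (x :: h) = segStarL h := by
  by_cases hm : '[' ∈ h
  · have hinf : ['['] <:+: h := (List.singleton_infix_iff _ _).2 hm
    have hnn : 0 ≤ PySem.Chars.find h ['['] := (PySem.Chars.find_nonneg_iff _ _).2 hinf
    obtain ⟨hp, hmn⟩ := PySem.Chars.find_spec hnn
    set m := (PySem.Chars.find h ['[']).toNat with hmdef
    have hfh : PySem.Chars.find h ['['] = (m : ℤ) := by omega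
    have hf : PySem.Chars.find (x :: h) ['['] = ((m + 1 : ℕ) : ℤ) := by
      apply find_eq_of_first
      · simpa using hp
      · intro i hi
        cases i with
        | zero => simp [List.cons_prefix_cons, Ne.symm hx]
        | succ j =>
          have := hmn j (by omega)
          simpa using this
    have h3 : ((m : ℤ) + 1).toNat = m + 1 := by omega
    have h4 : ((m : ℤ)).toNat = m := by omega
    simp only [segStarL, hf, hfh, PySem.Chars.slice_eq_listSlice]
    rw [PySem.List.slice_from (x :: h) (by omega), PySem.List.slice_from h (by omega)]
    have h1 : (((m : ℤ) + 1 : ℤ) != -1) = true := by simp only [bne_iff_ne, ne_eq]; omega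
    have h2 : (((m : ℤ) : ℤ) != -1) = true := by simp only [bne_iff_ne, ne_eq]; omega
    simp only [Nat.cast_add, Nat.cast_one] at h1 ⊢
    simp [h1, h2, h3, h4]
  · have hni : ¬ ['['] <:+: (x :: h) := by
      rw [List.singleton_infix_iff]; simp [Ne.symm hx, hm]
    have hni' : ¬ ['['] <:+: h := by rw [List.singleton_infix_iff]; exact hm
    have h1 : PySem.Chars.find (x :: h) ['['] = -1 := (PySem.Chars.find_eq_neg_one_iff _ _).2 hni
    have h2 : PySem.Chars.find h ['['] = -1 := (PySem.Chars.find_eq_neg_one_iff _ _).2 hni'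
    simp [segStarL, h1, h2]

-- the main invariant: A's state machine, from either state, against B's split view
theorem loop_eq_split (l : List Char) :
    (checkBracketsLoopA l false
        = (segStarL (splitChar ']' l).1 || (splitChar ']' l).2.any segStarL)) ∧
    (checkBracketsLoopA l true
        = ((splitChar ']' l).1.contains '*' || (splitChar ']' l).2.any segStarL)) := by
  induction l with
  | nil => simp [checkBracketsLoopA, splitChar, segStarL_nil]
  | cons x rest ih =>
    obtain ⟨ihP, ihQ⟩ := ih
    by_cases h1 : x = '['
    · subst h1
      constructor
      · simp [checkBracketsLoopA, splitChar, ihQ, segStarL_bracket_cons]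
      · simp [checkBracketsLoopA, splitChar, ihQ]
    · by_cases h2 : x = ']'
      · subst h2
        constructor
        · simp [checkBracketsLoopA, splitChar, ihP, segStarL_nil]
        · simp [checkBracketsLoopA, splitChar, ihP]
      · by_cases h3 : x = '*'
        · subst h3
          constructor
          · simp [checkBracketsLoopA, splitChar, h2, ihP, segStarL_cons_of_ne h1]
          · simp [checkBracketsLoopA, splitChar, h2]
        · constructor
          · simp [checkBracketsLoopA, splitChar, h1, h2, h3, ihP, segStarL_cons_of_ne h1]
          · simp [checkBracketsLoopA, splitChar, h1, h2, h3, ihQ, Ne.symm h3]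

-- ===== VERDICT (by name: the statement is the Claim_ definition above) =====
theorem check_brackets_spec : Claim_equal_check_brackets := by
  intro s _
  unfold Spec_check_brackets check_brackets check_brackets_alt
  cases hsp : PySem.Str.split? s "]" with
  | none =>
    exfalso
    have := PySem.Str.split?_map s "]"
    rw [hsp] at this
    simp [PySem.Chars.split?] at this
  | some segs =>
    have hmap := PySem.Str.split?_map s "]"
    rw [hsp] at hmap
    simp only [Option.map_some, PySem.Chars.split?] at hmap
    have hsegs : segs.map String.toList = PySem.Chars.splitOn s.toList "]".toList := by
      simpa using hmap
    have hany : segs.any segHasStarAfterBracket = (segs.map String.toList).any segStarL := by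
      have hfun : segHasStarAfterBracket = fun seg => segStarL seg.toList :=
        funext segHasStarAfterBracket_toList
      simp only [List.any_map, hfun, Function.comp_def]
    simp only [hany, hsegs, show "]".toList = [']'] from rfl, splitOn_single]
    simp [List.any_cons, (loop_eq_split s.toList).1]
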